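-- pv_equiv track=rewrite | github.com/tim-vdm/camelot | src/build/bdist.macosx-10.9-x86_64/egg/vfinance/model/bank/validation.py | split_ogm
-- ===== SOURCE A (Python) =====
-- import string
--
-- def split_ogm( ogm ):
--     """
--     split an ogm in it's integer base and a checksum
--
--     :return: (base, check) both as integers, return None if the ogm could
--              not be split
--     """
--     if ogm is None:
--         return None, None
--     code = ''.join( [ c for c in ''.join( ogm ) if c in string.digits] )
--     if len(code) > 2:
--         base = int(code[:-2].lstrip('0') or '0')
--         check = int(code[-2:].lstrip('0') or '0')
--         return base, check
--     return None, None
-- ===== SOURCE B (Python) =====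
-- def split_ogm(ogm):
--     """
--     split an ogm in it's integer base and a checksum
--
--     :return: (base, check) both as integers, return None if the ogm could
--              not be split
--     """
--     if ogm is None:
--         return None, None
--     code = ''.join(c for c in ogm if '0' <= c <= '9')
--     if len(code) <= 2:
--         return None, None
--     return divmod(int(code), 100)
-- ===== Notes on version B (the rewrite author's own statement) =====
-- stated objective: simpler
-- what changed: B parses the filtered digit string once with a single int() and separates base and checksum arithmetically with divmod by 100, instead of A's two slices, each normalized by stripping leading zeros with an empty-string fallback and parsed by a separate int() call.
import Mathlib
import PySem

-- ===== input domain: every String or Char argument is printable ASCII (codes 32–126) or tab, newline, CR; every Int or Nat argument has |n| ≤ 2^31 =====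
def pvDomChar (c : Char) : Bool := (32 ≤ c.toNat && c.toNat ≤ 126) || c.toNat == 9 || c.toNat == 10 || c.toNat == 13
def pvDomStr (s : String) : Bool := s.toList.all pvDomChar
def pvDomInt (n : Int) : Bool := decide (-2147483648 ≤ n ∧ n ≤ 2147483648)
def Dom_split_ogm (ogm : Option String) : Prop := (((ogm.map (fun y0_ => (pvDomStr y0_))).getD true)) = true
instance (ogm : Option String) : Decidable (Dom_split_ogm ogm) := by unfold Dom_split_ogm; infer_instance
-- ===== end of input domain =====

-- B parses the filtered digit string once and splits it with divmod(·, 100) instead of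
-- A's two slices with lstrip('0')-normalisation and separate int() calls (objective: simpler).


-- ===== PORT A =====
-- int(cs) ported by hand for the strings it is fed here (nonempty, digits only —
-- '0'-fallback guarantees nonemptiness): exact there, since sign/whitespace/underscore
-- cases of Python's int() cannot occur on an all-digit string.
def pvIntOfDigits (cs : List Char) : Int :=
  cs.foldl (fun a c => 10 * a + ((c.toNat : Int) - 48)) 0

def split_ogm (ogm : Option String) : Option Int × Option Int :=
  match ogm with
  | none => (none, none)
  | some s =>
      -- code = ''.join([c for c in ''.join(ogm) if c in string.digits]); ''.join(ogm) = ogm for a str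
      let code : List Char := s.toList.filter (fun c => "0123456789".toList.contains c)
      if 2 < code.length then
        -- base = int(code[:-2].lstrip('0') or '0')  -- lstrip('0') ported by hand as dropWhile (== '0'): exact
        let b := (PySem.List.slice code none (some (-2))).dropWhile (fun c => c == '0')
        let base := pvIntOfDigits (if b.isEmpty then ['0'] else b)
        -- check = int(code[-2:].lstrip('0') or '0')
        let c := (PySem.List.slice code (some (-2)) none).dropWhile (fun c => c == '0')
        let check := pvIntOfDigits (if c.isEmpty then ['0'] else c)
        (some base, some check)
      else (none, none)

-- ===== PORT B =====
def split_ogm_alt (ogm : Option String) : Option Int × Option Int :=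
  match ogm with
  | none => (none, none)
  | some s =>
      let code : List Char := s.toList.filter (fun c => decide ('0' ≤ c) && decide (c ≤ '9'))
      if code.length ≤ 2 then (none, none)
      else
        -- divmod(int(code), 100) = (int(code) // 100, int(code) % 100); the divisor is the literal 100 ≠ 0
        (some (PySem.Int.floordiv (pvIntOfDigits code) 100),
         some (PySem.Int.mod (pvIntOfDigits code) 100))

-- ===== PRECONDITION & SPEC =====
def Spec_split_ogm (ogm : Option String) (out : Option Int × Option Int) : Prop := out = split_ogm_alt ogm
instance (ogm : Option String) (out : Option Int × Option Int) : Decidable (Spec_split_ogm ogm out) := by unfold Spec_split_ogm; infer_instance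

-- ===== CLAIM (what is proved, stated in full; the proofs are below) =====
def Claim_equal_split_ogm : Prop := ∀ (ogm : Option String), Dom_split_ogm ogm → Spec_split_ogm ogm (split_ogm ogm)


-- ===== LEMMAS AND PROOFS =====

-- both filters keep exactly the ASCII digits
set_option maxRecDepth 4000 in
theorem pvDigitPred_eq (c : Char) :
    ("0123456789".toList.contains c) = (decide ('0' ≤ c) && decide (c ≤ '9')) := by
  have h : "0123456789".toList = ['0','1','2','3','4','5','6','7','8','9'] := rfl
  rw [h, Bool.eq_iff_iff]
  simp only [List.contains, List.elem_eq_mem, List.mem_cons, List.not_mem_nil, or_false,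
    decide_eq_true_eq, Bool.and_eq_true, Char.le_def, Char.ext_iff, UInt32.le_iff_toNat_le,
    UInt32.ext_iff]
  have h0 : ('0').val.toNat = 48 := rfl
  have h9 : ('9').val.toNat = 57 := rfl
  rw [h0, h9, show ('1').val.toNat = 49 from rfl, show ('2').val.toNat = 50 from rfl,
    show ('3').val.toNat = 51 from rfl, show ('4').val.toNat = 52 from rfl,
    show ('5').val.toNat = 53 from rfl, show ('6').val.toNat = 54 from rfl,
    show ('7').val.toNat = 55 from rfl, show ('8').val.toNat = 56 from rfl]
  omega

theorem pvDigit_bounds (c : Char) (h : ("0123456789".toList.contains c) = true) :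
    48 ≤ c.toNat ∧ c.toNat ≤ 57 := by
  rw [pvDigitPred_eq] at h
  simp only [Bool.and_eq_true, decide_eq_true_eq, Char.le_def, UInt32.le_iff_toNat_le] at h
  have h0 : ('0').val.toNat = 48 := rfl
  have h9 : ('9').val.toNat = 57 := rfl
  have hc : c.toNat = c.val.toNat := rfl
  omega

-- foldl with an accumulator
theorem pvVal_acc (ys : List Char) (a : Int) :
    ys.foldl (fun a c => 10 * a + ((c.toNat : Int) - 48)) a
      = a * 10 ^ ys.length + pvIntOfDigits ys := by
  induction ys generalizing a with
  | nil => simp [pvIntOfDigits]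
  | cons y t ih =>
      simp only [List.foldl_cons, pvIntOfDigits] at *
      rw [ih, ih (10 * 0 + ((y.toNat : Int) - 48)), List.length_cons, pow_succ]
      ring

theorem pvVal_append (xs ys : List Char) :
    pvIntOfDigits (xs ++ ys) = pvIntOfDigits xs * 10 ^ ys.length + pvIntOfDigits ys := by
  simp only [pvIntOfDigits, List.foldl_append]
  exact pvVal_acc ys _

theorem pvVal_dropZeros (cs : List Char) :
    pvIntOfDigits (cs.dropWhile (fun c => c == '0')) = pvIntOfDigits cs := by
  induction cs with
  | nil => rfl
  | cons c t ih =>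
      by_cases hc : c = '0'
      · subst hc
        rw [List.dropWhile_cons_of_pos (by simp), ih]
        simp [pvIntOfDigits]
      · rw [List.dropWhile_cons_of_neg (by simp [hc])]

theorem pvVal_strip (cs : List Char) :
    pvIntOfDigits (if (cs.dropWhile (fun c => c == '0')).isEmpty then ['0']
                   else cs.dropWhile (fun c => c == '0')) = pvIntOfDigits cs := by
  by_cases h : (cs.dropWhile (fun c => c == '0')).isEmpty
  · rw [if_pos h, ← pvVal_dropZeros cs, List.isEmpty_iff.mp h]
    rfl
  · rw [if_neg h, pvVal_dropZeros]

theorem pvVal_nonneg (cs : List Char) (h : ∀ c ∈ cs, 48 ≤ c.toNat) : 0 ≤ pvIntOfDigits cs := by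
  induction cs with
  | nil => simp [pvIntOfDigits]
  | cons c t ih =>
      have := h c (by simp)
      have ht := ih (fun x hx => h x (by simp [hx]))
      show 0 ≤ (c :: t).foldl (fun a c => 10 * a + ((c.toNat : Int) - 48)) 0
      rw [List.foldl_cons, pvVal_acc]
      have : (0 : Int) ≤ 10 * 0 + ((c.toNat : Int) - 48) := by omega
      positivity

-- ===== VERDICT (by name: the statement is the Claim_ definition above) =====
theorem split_ogm_spec : Claim_equal_split_ogm := by
  unfold Claim_equal_split_ogm
  intro ogm _
  unfold Spec_split_ogm
  rcases ogm with _ | s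
  · rfl
  · simp only [split_ogm, split_ogm_alt]
    have hfilt : s.toList.filter (fun c => decide ('0' ≤ c) && decide (c ≤ '9'))
        = s.toList.filter (fun c => "0123456789".toList.contains c) :=
      List.filter_congr (fun c _ => (pvDigitPred_eq c).symm)
    rw [hfilt]
    set code := s.toList.filter (fun c => "0123456789".toList.contains c) with hcode
    have hdig : ∀ c ∈ code, 48 ≤ c.toNat ∧ c.toNat ≤ 57 := by
      intro c hc
      exact pvDigit_bounds c (List.of_mem_filter hc)
    by_cases hlen : 2 < code.length
    · rw [if_pos hlen, if_neg (show ¬ code.length ≤ 2 by omega)]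
      rw [PySem.List.slice_to_neg_ofNat code 2 (by omega),
        PySem.List.slice_from_neg_ofNat code 2 (by omega)]
      set front := code.take (code.length - 2) with hfront
      set back := code.drop (code.length - 2) with hback
      have hsplit : front ++ back = code := List.take_append_drop _ _
      have hbl : back.length = 2 := by
        rw [hback, List.length_drop]; omega
      obtain ⟨x, y, hxy⟩ := List.length_eq_two.mp hbl
      have hx := hdig x (by rw [← hsplit]; simp [hxy])
      have hy := hdig y (by rw [← hsplit]; simp [hxy])
      have hbb : 0 ≤ pvIntOfDigits back ∧ pvIntOfDigits back < 100 := by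
        rw [hxy]
        simp only [pvIntOfDigits, List.foldl_cons, List.foldl_nil]
        omega
      have hfnn : 0 ≤ pvIntOfDigits front := by
        apply pvVal_nonneg
        intro c hc
        exact (hdig c (by rw [← hsplit]; exact List.mem_append_left _ hc)).1
      have hval : pvIntOfDigits code = pvIntOfDigits front * 100 + pvIntOfDigits back := by
        rw [← hsplit, pvVal_append, hbl]; norm_num
      rw [PySem.Int.floordiv_eq_ediv_of_pos (by norm_num),
        PySem.Int.mod_eq_emod_of_pos (by norm_num)]
      rw [pvVal_strip front, pvVal_strip back]
      simp only [Prod.mk.injEq, Option.some.injEq]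
      constructor
      · rw [hval]; omega
      · rw [hval]; omega
    · rw [if_neg hlen, if_pos (by omega)]
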